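-- pv_equiv track=rewrite | github.com/Helen300/ccinterview | powerSet.py | convertIntToSet
-- ===== SOURCE A (Python) =====
-- def convertIntToSet(num, arr):
-- 	subset = []
-- 	index = 0
-- 	k = num
-- 	while k > 0:
-- 		if (k & 1) == 1:
-- 			subset.append(arr[index])
-- 		index += 1
-- 		k >>= 1
-- 	return subset
-- ===== SOURCE B (Python) =====
-- def convertIntToSet(num, arr):
--     if num <= 0:
--         return []
--     return [arr[i] for i, ch in enumerate(reversed(bin(num)[2:])) if ch == '1']
-- ===== Notes on version B (the rewrite author's own statement) =====
-- stated objective: idiomatic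
-- what changed: Replaces the while-loop with a running index, right-shifts and appends by a single comprehension over the enumerated reversed binary string bin(num)[2:], deriving indices from enumeration instead of mutable loop state.
import Mathlib
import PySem

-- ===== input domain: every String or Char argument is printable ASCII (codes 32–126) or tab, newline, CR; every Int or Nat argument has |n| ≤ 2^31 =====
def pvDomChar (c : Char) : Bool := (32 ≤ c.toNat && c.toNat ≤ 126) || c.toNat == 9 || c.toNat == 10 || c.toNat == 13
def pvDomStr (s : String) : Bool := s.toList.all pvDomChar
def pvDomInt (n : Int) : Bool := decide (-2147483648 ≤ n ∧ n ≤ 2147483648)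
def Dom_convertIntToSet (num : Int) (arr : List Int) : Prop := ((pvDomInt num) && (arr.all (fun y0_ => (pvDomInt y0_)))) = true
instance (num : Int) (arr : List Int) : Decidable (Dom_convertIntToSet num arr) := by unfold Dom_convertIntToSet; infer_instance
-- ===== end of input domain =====

-- B replaces A's while-loop with mutable index/shift state by a comprehension over the
-- enumerated reversed binary string of num (idiomatic; same cost).

-- ===== PORT A =====
-- the while-loop: state (subset, index, k); arr[index] is pyGetD (in range on Pre_)
def convA_go (arr : List Int) (subset : List Int) (index : Int) (k : Int) : List Int :=
  if h : k > 0 then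
    convA_go arr
      (if PySem.Int.band k 1 = 1 then subset ++ [PySem.List.pyGetD arr index 0] else subset)
      (index + 1) (k >>> (1 : Nat))
  else subset
termination_by k.toNat
decreasing_by
  have h2 : k >>> (1 : Nat) = k / 2 := by
    simp [Int.shiftRight_eq_div_pow]
  omega

def convertIntToSet (num : Int) (arr : List Int) : List Int :=
  convA_go arr [] 0 num

-- ===== PORT B =====
-- reversed(bin(n)[2:]) as a list of '0'/'1' chars, least-significant bit first
def binRev (n : Nat) : List Char :=
  if n = 0 then [] else (if n % 2 = 1 then '1' else '0') :: binRev (n / 2)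

def convertIntToSet_alt (num : Int) (arr : List Int) : List Int :=
  if num ≤ 0 then []
  else ((PySem.List.enumerate (binRev num.toNat) 0).filter (fun p => p.2 == '1')).map
        (fun p => PySem.List.pyGetD arr p.1 0)

-- ===== PRECONDITION & SPEC =====
-- Pre_ excludes exactly the inputs where Python A raises IndexError: some set bit of num
-- indexes past the end of arr, i.e. num ≥ 2 ^ len(arr).
def Pre_convertIntToSet (num : Int) (arr : List Int) : Prop := num < 2 ^ arr.length
instance (num : Int) (arr : List Int) : Decidable (Pre_convertIntToSet num arr) := by
  unfold Pre_convertIntToSet; infer_instance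

def pvWitness_convertIntToSet : Int × List Int := (6, [1, 2, 3])

def Spec_convertIntToSet (num : Int) (arr : List Int) (out : List Int) : Prop := out = convertIntToSet_alt num arr
instance (num : Int) (arr : List Int) (out : List Int) : Decidable (Spec_convertIntToSet num arr out) := by unfold Spec_convertIntToSet; infer_instance

-- ===== CLAIM (what is proved, stated in full; the proofs are below) =====
def Claim_equal_convertIntToSet : Prop := ∀ (num : Int) (arr : List Int), Dom_convertIntToSet num arr → Pre_convertIntToSet num arr → Spec_convertIntToSet num arr (convertIntToSet num arr)

-- ===== LEMMAS AND PROOFS =====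

theorem binRev_succ (n : Nat) (h : n ≠ 0) :
    binRev n = (if n % 2 = 1 then '1' else '0') :: binRev (n / 2) := by
  rw [binRev]; simp [h]

-- loop invariant: the rest of A's loop appends exactly B's comprehension from position `index`
theorem convA_go_eq (arr : List Int) (k : Int) (subset : List Int) (index : Int) :
    convA_go arr subset index k =
      subset ++ ((PySem.List.enumerate (binRev k.toNat) index).filter (fun p => p.2 == '1')).map
        (fun p => PySem.List.pyGetD arr p.1 0) := by
  by_cases h : k > 0
  · obtain ⟨m, hm⟩ : ∃ m : Nat, k = (m : Int) := ⟨k.toNat, by omega⟩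
    subst hm
    have hm0 : m ≠ 0 := by omega
    rw [convA_go]
    simp only [h, dite_true]
    have hshift : (m : Int) >>> (1 : Nat) = ((m / 2 : Nat) : Int) := by
      rw [Int.shiftRight_eq_div_pow]
      norm_num
    have hband : PySem.Int.band (m : Int) 1 = ((m % 2 : Nat) : Int) := by
      have := PySem.Int.band_natCast m 1
      simpa [Nat.and_one_is_mod] using this
    rw [hshift, convA_go_eq arr ((m / 2 : Nat) : Int), hband]
    rw [Int.toNat_natCast, Int.toNat_natCast, binRev_succ m hm0,
        PySem.List.enumerate_cons]
    by_cases hpar : m % 2 = 1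
    · simp [hpar]
    · simp [hpar]
      omega
  · rw [convA_go]
    have : k.toNat = 0 := by omega
    simp [h, this, binRev, PySem.List.enumerate_nil]
termination_by k.toNat
decreasing_by omega

-- ===== VERDICT (by name: the statement is the Claim_ definition above) =====
theorem convertIntToSet_spec : Claim_equal_convertIntToSet := by
  intro num arr _ _
  unfold Spec_convertIntToSet convertIntToSet convertIntToSet_alt
  rw [convA_go_eq]
  by_cases h : num ≤ 0
  · have : num.toNat = 0 := by omega
    simp [h, this, binRev, PySem.List.enumerate_nil]
  · simp [h]
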